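-- pv_equiv track=rewrite | github.com/WhiteNight123/SICP | hw03-Code/hw03.py | missing_digits
-- ===== SOURCE A (Python) =====
-- def missing_digits(n):
--     """Given a number a that is in sorted, increasing order,
--     return the number of missing digits in n. A missing digit is
--     a number between the first and last digit of a that is not in n.
--     >>> missing_digits(1248) # 3, 5, 6, 7
--     4
--     >>> missing_digits(1122) # No missing numbers
--     0
--     >>> missing_digits(123456) # No missing numbers
--     0
--     >>> missing_digits(3558) # 4, 6, 7
--     3
--     >>> missing_digits(4) # No missing numbers between 4 and 4
--     0
--     >>> from construct_check import check
--     >>> # ban while or for loops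
--     >>> check(HW_SOURCE_FILE, 'missing_digits', ['While', 'For'])
--     True
--     """
--     "*** YOUR CODE HERE ***"
--     def missing_num(x, y):
--         if x == y or x == y + 1:
--             return 0
--         else:
--             return x - y - 1
--     if n < 10:
--         return 0
--     if n < 100:
--         return missing_num(n % 10, n // 10 % 10)
--     return missing_digits(n // 10) + missing_num(n % 10, n // 10 % 10)
-- ===== SOURCE B (Python) =====
-- def missing_digits(n):
--     def missing_num(x, y):
--         if x == y or x == y + 1:
--             return 0
--         else:
--             return x - y - 1
--     total = 0
--     while n >= 10:
--         total += missing_num(n % 10, n // 10 % 10)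
--         n //= 10
--     return total
-- ===== Notes on version B (the rewrite author's own statement) =====
-- stated objective: idiomatic
-- what changed: Replaced A's non-tail recursion over the truncated number with an explicit while-loop accumulating the same per-adjacent-digit-pair contributions into a running total.
import Mathlib
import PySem

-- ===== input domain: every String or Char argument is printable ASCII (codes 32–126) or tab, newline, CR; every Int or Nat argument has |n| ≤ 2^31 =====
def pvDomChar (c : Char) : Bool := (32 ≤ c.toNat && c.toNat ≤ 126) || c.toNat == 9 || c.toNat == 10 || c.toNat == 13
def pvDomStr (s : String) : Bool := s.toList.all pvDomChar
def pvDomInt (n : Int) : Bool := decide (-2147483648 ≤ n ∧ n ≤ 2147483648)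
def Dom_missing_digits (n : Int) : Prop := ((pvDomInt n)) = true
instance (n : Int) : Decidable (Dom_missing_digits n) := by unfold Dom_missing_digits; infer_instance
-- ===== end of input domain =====

-- B replaces A's non-tail recursion with an explicit accumulator loop (idiomatic); same values everywhere.

-- ===== PORT A =====
-- A's inner helper missing_num(x, y)
def missing_num (x y : Int) : Int :=
  if x = y ∨ x = y + 1 then 0 else x - y - 1

def missing_digits (n : Int) : Int :=
  if n < 10 then 0
  else if n < 100 then
    missing_num (PySem.Int.mod n 10) (PySem.Int.mod (PySem.Int.floordiv n 10) 10)
  else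
    missing_digits (PySem.Int.floordiv n 10) +
      missing_num (PySem.Int.mod n 10) (PySem.Int.mod (PySem.Int.floordiv n 10) 10)
termination_by n.toNat
decreasing_by
  simp only [PySem.Int.floordiv]
  rw [Int.fdiv_eq_ediv]
  omega

-- ===== PORT B =====
-- the while-loop: state (n, total)
def md_loop (n total : Int) : Int :=
  if 10 ≤ n then
    md_loop (PySem.Int.floordiv n 10)
      (total + missing_num (PySem.Int.mod n 10) (PySem.Int.mod (PySem.Int.floordiv n 10) 10))
  else total
termination_by n.toNat
decreasing_by
  simp only [PySem.Int.floordiv]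
  rw [Int.fdiv_eq_ediv]
  omega

def missing_digits_alt (n : Int) : Int := md_loop n 0

-- ===== PRECONDITION & SPEC =====
def Spec_missing_digits (n : Int) (out : Int) : Prop := out = missing_digits_alt n
instance (n : Int) (out : Int) : Decidable (Spec_missing_digits n out) := by unfold Spec_missing_digits; infer_instance

-- ===== CLAIM (what is proved, stated in full; the proofs are below) =====
def Claim_equal_missing_digits : Prop := ∀ (n : Int), Dom_missing_digits n → Spec_missing_digits n (missing_digits n)

-- ===== LEMMAS AND PROOFS =====

-- loop invariant: the loop adds missing_digits n to the accumulator
theorem md_loop_eq (n total : Int) : md_loop n total = total + missing_digits n := by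
  induction n using missing_digits.induct generalizing total with
  | case1 n h =>
    rw [md_loop, missing_digits]
    simp only [if_pos h, if_neg (by omega : ¬ (10 ≤ n))]
    omega
  | case2 n h1 h2 =>
    have h10 : ¬ (10 ≤ PySem.Int.floordiv n 10) := by
      simp only [PySem.Int.floordiv]; rw [Int.fdiv_eq_ediv]; omega
    rw [md_loop, md_loop, missing_digits]
    simp only [if_pos (by omega : (10:Int) ≤ n), if_neg h10, if_neg h1, if_pos h2]
  | case3 n h1 h2 ih =>
    rw [md_loop, missing_digits]
    simp only [if_pos (by omega : (10:Int) ≤ n), if_neg h1, if_neg h2, ih]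
    omega

-- ===== VERDICT (by name: the statement is the Claim_ definition above) =====
theorem missing_digits_spec : Claim_equal_missing_digits := by
  intro n _
  unfold Spec_missing_digits missing_digits_alt
  rw [md_loop_eq]
  omega
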